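-- pv_equiv track=rewrite | github.com/k-roy/RECTIFY | rectify/core/bam_writer.py | _normalize_cigar_ops
-- ===== SOURCE A (Python) =====
-- def _normalize_cigar_ops(ops) -> list:
--     """Return ops with = (7) and X (8) converted to M (0) and adjacent same-ops merged."""
--     norm = [(0 if op in (7, 8) else op, length) for op, length in ops]
--     merged: list = []
--     for op, length in norm:
--         if merged and merged[-1][0] == op:
--             merged[-1] = (merged[-1][0], merged[-1][1] + length)
--         else:
--             merged.append([op, length])
--     return [tuple(x) for x in merged]
-- ===== SOURCE B (Python) =====
-- def _normalize_cigar_ops(ops) -> list: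
--     """Return ops with = (7) and X (8) converted to M (0) and adjacent same-ops merged."""
--     norm = [(0 if op in (7, 8) else op, length) for op, length in ops]
--     out = []
--     i = 0
--     n = len(norm)
--     while i < n:
--         op = norm[i][0]
--         total = 0
--         j = i
--         while j < n and norm[j][0] == op:
--             total += norm[j][1]
--             j += 1
--         out.append((op, total))
--         i = j
--     return out
-- ===== Notes on version B (the rewrite author's own statement) =====
-- stated objective: alternative
-- what changed: Replaces A's accumulator with a mutable last-element merge by a two-pointer run-length pass: for each maximal run of equal op codes it sums the lengths once and emits one tuple.
import Mathlib
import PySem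

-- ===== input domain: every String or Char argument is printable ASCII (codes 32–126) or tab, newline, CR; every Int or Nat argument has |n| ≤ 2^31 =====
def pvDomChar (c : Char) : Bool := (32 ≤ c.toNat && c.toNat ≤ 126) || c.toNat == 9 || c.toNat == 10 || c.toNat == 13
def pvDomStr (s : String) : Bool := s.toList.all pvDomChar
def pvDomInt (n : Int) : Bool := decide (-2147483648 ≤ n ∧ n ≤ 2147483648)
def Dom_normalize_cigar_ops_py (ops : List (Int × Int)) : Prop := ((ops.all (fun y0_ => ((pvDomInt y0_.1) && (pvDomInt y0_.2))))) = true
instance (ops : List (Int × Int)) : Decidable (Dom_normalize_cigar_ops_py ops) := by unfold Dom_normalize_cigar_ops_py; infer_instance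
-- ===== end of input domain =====

-- B replaces A's mutable last-element merge by a two-pointer run-summing pass (alternative decomposition, same cost).

-- ===== PORT A =====
-- normalization of one (op, length) pair: = (7) and X (8) become M (0)
def pvNormPair (p : Int × Int) : Int × Int := (if p.1 = 7 ∨ p.1 = 8 then 0 else p.1, p.2)

-- one iteration of A's merge loop: `if merged and merged[-1][0] == op: merged[-1] = (..., ... + length) else: merged.append(...)`
def pvStepA (merged : List (Int × Int)) (p : Int × Int) : List (Int × Int) :=
  match merged.getLast? with
  | some q => if q.1 == p.1 then merged.dropLast ++ [(q.1, q.2 + p.2)] else merged ++ [p]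
  | none => merged ++ [p]

def normalize_cigar_ops_py (ops : List (Int × Int)) : List (Int × Int) :=
  let norm := ops.map pvNormPair
  let merged := norm.foldl pvStepA []
  merged.map (fun x => (x.1, x.2))  -- [tuple(x) for x in merged]

-- ===== PORT B =====
-- B's outer while-loop: take a maximal run of equal op codes, sum its lengths, emit one pair, advance
def pvRuns (l : List (Int × Int)) : List (Int × Int) :=
  match l with
  | [] => []
  | x :: rest =>
      (x.1, x.2 + ((rest.takeWhile (fun q => q.1 == x.1)).map Prod.snd).sum)
        :: pvRuns (rest.dropWhile (fun q => q.1 == x.1))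
termination_by l.length
decreasing_by
  simp only [List.length_cons]
  exact Nat.lt_succ_of_le (List.length_dropWhile_le _ _)

def normalize_cigar_ops_py_alt (ops : List (Int × Int)) : List (Int × Int) :=
  pvRuns (ops.map pvNormPair)

-- ===== PRECONDITION & SPEC =====
def Spec_normalize_cigar_ops_py (ops : List (Int × Int)) (out : List (Int × Int)) : Prop := out = normalize_cigar_ops_py_alt ops
instance (ops : List (Int × Int)) (out : List (Int × Int)) : Decidable (Spec_normalize_cigar_ops_py ops out) := by unfold Spec_normalize_cigar_ops_py; infer_instance

-- ===== CLAIM (what is proved, stated in full; the proofs are below) =====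
def Claim_equal_normalize_cigar_ops_py : Prop := ∀ (ops : List (Int × Int)), Dom_normalize_cigar_ops_py ops → Spec_normalize_cigar_ops_py ops (normalize_cigar_ops_py ops)

-- ===== LEMMAS AND PROOFS =====

-- A's fold, started with accumulator m ++ [(op, a)], produces m followed by the runs of (op, a) :: l.
theorem pv_fold_runs (l : List (Int × Int)) : ∀ (op a : Int) (m : List (Int × Int)),
    List.foldl pvStepA (m ++ [(op, a)]) l = m ++ pvRuns ((op, a) :: l) := by
  induction l with
  | nil =>
      intro op a m
      simp [pvRuns, List.takeWhile, List.dropWhile]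
  | cons q rest ih =>
      intro op a m
      by_cases h : q.1 = op
      · have hstep : pvStepA (m ++ [(op, a)]) q = m ++ [(op, a + q.2)] := by
          simp [pvStepA, h]
        rw [List.foldl_cons, hstep, ih]
        rw [pvRuns, pvRuns]
        simp [List.takeWhile, List.dropWhile, h, add_assoc]
      · have hb : (q.1 == op) = false := by simp [h]
        have hstep : pvStepA (m ++ [(op, a)]) q = (m ++ [(op, a)]) ++ [(q.1, q.2)] := by
          simp [pvStepA]
          intro he; exact absurd he.symm h
        rw [List.foldl_cons, hstep, ih]
        conv_rhs => rw [pvRuns]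
        simp [List.takeWhile, List.dropWhile, hb, pvRuns]

-- ===== VERDICT (by name: the statement is the Claim_ definition above) =====
theorem normalize_cigar_ops_py_spec : Claim_equal_normalize_cigar_ops_py := by
  intro ops _
  unfold Spec_normalize_cigar_ops_py normalize_cigar_ops_py normalize_cigar_ops_py_alt
  cases hm : ops.map pvNormPair with
  | nil => simp [pvRuns]
  | cons p rest =>
      show List.map (fun x => (x.1, x.2)) (List.foldl pvStepA [] (p :: rest)) = pvRuns (p :: rest)
      have h0 : pvStepA [] p = [] ++ [(p.1, p.2)] := by simp [pvStepA]
      rw [List.foldl_cons, h0, pv_fold_runs]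
      simp
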